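-- pv_equiv track=rewrite | github.com/khanhnam-nathan/Pyneat | pyneat/rules/refactoring.py | _has_arrow_anti_pattern
-- ===== SOURCE A (Python) =====
-- def _has_arrow_anti_pattern(content: str) -> bool:
--     """Check if code has arrow anti-pattern (deeply nested if-else) at module level."""
--     lines = content.split('\n')
--     max_nesting = 0
--     current_nesting = 0
--
--     for line in lines:
--         stripped = line.strip()
--         if stripped.startswith('if ') or stripped.startswith('elif '):
--             # Only count module-level conditionals (zero indentation)
--             indent = len(line) - len(line.lstrip())
--             if indent == 0:
--                 current_nesting += 1
--                 max_nesting = max(max_nesting, current_nesting)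
--         elif stripped.startswith('else:'):
--             indent = len(line) - len(line.lstrip())
--             if indent == 0:
--                 current_nesting += 1
--                 max_nesting = max(max_nesting, current_nesting)
--         elif stripped and not stripped.startswith('#'):
--             if not line.startswith('    ') and not line.startswith('\t'):
--                 current_nesting = 0
--
--     return max_nesting >= 4
-- ===== SOURCE B (Python) =====
-- def _signature(content: str) -> str:
--     """Tag string of the file: 'C' for each module-level conditional line, 'R' for
--     each line that resets the nesting; other lines contribute nothing."""
--     sig = []
--     for line in content.split('\n'):
--         stripped = line.strip()
--         if stripped.startswith(('if ', 'elif ', 'else:')):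
--             if len(line) == len(line.lstrip()):
--                 sig.append('C')
--         elif stripped and not stripped.startswith('#'):
--             if not line.startswith(('    ', '\t')):
--                 sig.append('R')
--     return ''.join(sig)
--
--
-- def _has_arrow_anti_pattern(content: str) -> bool:
--     """Nesting reaches 4 iff four conditionals occur consecutively with no reset
--     in between, i.e. iff 'CCCC' is a substring of the tag string."""
--     return 'CCCC' in _signature(content)
-- ===== Notes on version B (the rewrite author's own statement) =====
-- stated objective: alternative
-- what changed: B compiles the file into a tag string ('C' per module-level conditional, 'R' per resetting line) and answers by substring search ('CCCC' in it), replacing A's running counter with max tracking by a substring-membership decision.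
import Mathlib
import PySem

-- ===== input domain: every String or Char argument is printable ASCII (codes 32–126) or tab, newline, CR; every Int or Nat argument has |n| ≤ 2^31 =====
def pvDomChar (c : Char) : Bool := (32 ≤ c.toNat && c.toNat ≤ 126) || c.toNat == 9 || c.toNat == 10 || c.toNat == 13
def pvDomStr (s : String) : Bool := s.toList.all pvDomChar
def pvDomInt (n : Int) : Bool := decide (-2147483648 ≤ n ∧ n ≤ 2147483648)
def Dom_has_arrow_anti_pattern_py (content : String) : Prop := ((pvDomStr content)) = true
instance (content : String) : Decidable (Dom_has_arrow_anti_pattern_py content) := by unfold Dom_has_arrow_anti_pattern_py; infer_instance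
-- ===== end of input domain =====

-- B replaces A's running counter/max scan by compiling the file into a tag string
-- ('C' per module-level conditional, 'R' per resetting line) and deciding by the
-- substring search 'CCCC' in it; same O(n) cost ("alternative").

-- ===== PORT A =====
-- one loop iteration of A: state = (max_nesting, current_nesting); lines as List Char
def arrowStepA (st : Nat × Nat) (line : List Char) : Nat × Nat :=
  if PySem.Chars.startswith (PySem.Chars.strip line) "if ".toList
      || PySem.Chars.startswith (PySem.Chars.strip line) "elif ".toList then
    if PySem.Chars.len line - PySem.Chars.len (PySem.Chars.lstrip line) == 0 then
      (max st.1 (st.2 + 1), st.2 + 1)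
    else st
  else if PySem.Chars.startswith (PySem.Chars.strip line) "else:".toList then
    if PySem.Chars.len line - PySem.Chars.len (PySem.Chars.lstrip line) == 0 then
      (max st.1 (st.2 + 1), st.2 + 1)
    else st
  else if !(PySem.Chars.strip line == [])
      && !PySem.Chars.startswith (PySem.Chars.strip line) "#".toList then
    if !PySem.Chars.startswith line "    ".toList && !PySem.Chars.startswith line "\t".toList then
      (st.1, 0)
    else st
  else st

def has_arrow_anti_pattern_py (content : String) : Bool :=
  decide (4 ≤ ((PySem.Chars.splitOn content.toList ['\n']).foldl arrowStepA (0, 0)).1)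

-- ===== PORT B =====
-- Source B's per-line contribution to the signature: some 'C' / some 'R' / none
def arrowTag (line : List Char) : Option Char :=
  if PySem.Chars.startswith (PySem.Chars.strip line) "if ".toList
      || PySem.Chars.startswith (PySem.Chars.strip line) "elif ".toList
      || PySem.Chars.startswith (PySem.Chars.strip line) "else:".toList then
    if PySem.Chars.len line == PySem.Chars.len (PySem.Chars.lstrip line) then some 'C' else none
  else if !(PySem.Chars.strip line == [])
      && !PySem.Chars.startswith (PySem.Chars.strip line) "#".toList then
    if !PySem.Chars.startswith line "    ".toList && !PySem.Chars.startswith line "\t".toList then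
      some 'R'
    else none
  else none

-- Source B's _signature: the loop appends tags to sig; ''.join of single chars is the list itself
def arrowSignature (content : String) : List Char :=
  (PySem.Chars.splitOn content.toList ['\n']).foldl
    (fun sig line => match arrowTag line with
      | some t => sig ++ [t]
      | none => sig) []

def has_arrow_anti_pattern_py_alt (content : String) : Bool :=
  PySem.Chars.isIn "CCCC".toList (arrowSignature content)

-- ===== PRECONDITION & SPEC =====
def Spec_has_arrow_anti_pattern_py (content : String) (out : Bool) : Prop := out = has_arrow_anti_pattern_py_alt content
instance (content : String) (out : Bool) : Decidable (Spec_has_arrow_anti_pattern_py content out) := by unfold Spec_has_arrow_anti_pattern_py; infer_instance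

-- ===== CLAIM =====
def Claim_equal_has_arrow_anti_pattern_py : Prop := ∀ (content : String), Dom_has_arrow_anti_pattern_py content → Spec_has_arrow_anti_pattern_py content (has_arrow_anti_pattern_py content)

-- ===== LEMMAS AND PROOFS =====

-- A's loop body acting on a tag: 'C' bumps the counter, anything else resets it
def tagStep (st : Nat × Nat) (t : Char) : Nat × Nat :=
  if t == 'C' then (max st.1 (st.2 + 1), st.2 + 1) else (st.1, 0)

-- the best (largest) counter value ever reached scanning the tags with current streak c
def bestStreak (ts : List Char) (c : Nat) : Nat :=
  match ts with
  | [] => 0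
  | t :: ts => if t == 'C' then max (c + 1) (bestStreak ts (c + 1)) else bestStreak ts 0

theorem bestStreak_consC (ts : List Char) (c : Nat) :
    bestStreak ('C' :: ts) c = max (c + 1) (bestStreak ts (c + 1)) := by
  simp [bestStreak]

theorem bestStreak_cons_ne (t : Char) (ts : List Char) (c : Nat) (h : (t == 'C') = false) :
    bestStreak (t :: ts) c = bestStreak ts 0 := by
  simp [bestStreak, h]

-- A's loop body, expressed through B's tag of the line
theorem arrowStepA_eq_tag (st : Nat × Nat) (line : List Char) :
    arrowStepA st line =
      match arrowTag line with
      | some t => tagStep st t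
      | none => st := by
  have h6 : (PySem.Chars.len line == PySem.Chars.len (PySem.Chars.lstrip line))
      = (PySem.Chars.len line - PySem.Chars.len (PySem.Chars.lstrip line) == 0) := by
    simp [sub_eq_zero]
  unfold arrowStepA arrowTag tagStep
  rw [h6]
  by_cases ha : PySem.Chars.startswith (PySem.Chars.strip line) "if ".toList = true <;>
  by_cases hb : PySem.Chars.startswith (PySem.Chars.strip line) "elif ".toList = true <;>
  by_cases hc : PySem.Chars.startswith (PySem.Chars.strip line) "else:".toList = true <;>
  by_cases h3 : (PySem.Chars.len line - PySem.Chars.len (PySem.Chars.lstrip line) == 0) = true <;>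
  by_cases h4 : (!(PySem.Chars.strip line == [])
      && !PySem.Chars.startswith (PySem.Chars.strip line) "#".toList) = true <;>
  by_cases h5 : (!PySem.Chars.startswith line "    ".toList
      && !PySem.Chars.startswith line "\t".toList) = true <;>
  simp_all <;> split_ifs <;> simp_all

-- folding A's step over the lines = folding tagStep over the signature tags
theorem foldl_stepA_eq_tags (ls : List (List Char)) (st : Nat × Nat) :
    ls.foldl arrowStepA st = (ls.filterMap arrowTag).foldl tagStep st := by
  induction ls generalizing st with
  | nil => rfl
  | cons l ls ih =>
      simp only [List.foldl_cons, List.filterMap_cons, arrowStepA_eq_tag]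
      cases arrowTag l <;> simp [ih]

-- Source B's appending loop builds exactly the filterMap of the tags
theorem signature_eq_filterMap (ls : List (List Char)) (acc : List Char) :
    ls.foldl (fun sig line => match arrowTag line with
      | some t => sig ++ [t]
      | none => sig) acc = acc ++ ls.filterMap arrowTag := by
  induction ls generalizing acc with
  | nil => simp
  | cons l ls ih =>
      simp only [List.foldl_cons, List.filterMap_cons]
      cases arrowTag l <;> simp [ih]

-- the max component of the tag fold is the initial max joined with the best streak
theorem fold_tagStep_fst (ts : List Char) (m c : Nat) :
    (ts.foldl tagStep (m, c)).1 = max m (bestStreak ts c) := by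
  induction ts generalizing m c with
  | nil => simp [bestStreak]
  | cons t ts ih =>
      simp only [List.foldl_cons, tagStep, bestStreak]
      by_cases h : (t == 'C') = true <;> simp [h, ih]

-- four consecutive C's give the CCCC infix
theorem take_all_C_infix (ts : List Char) (ha : ((ts.take 4).all (· == 'C')) = true)
    (hl : 4 ≤ ts.length) : ['C', 'C', 'C', 'C'] <:+: ts := by
  match ts, hl with
  | a :: b :: d :: e :: rest, _ =>
    simp only [List.take_succ_cons, List.take_zero, List.all_cons, List.all_nil,
      Bool.and_eq_true, beq_iff_eq] at ha
    obtain ⟨ha1, ha2, ha3, ha4, -⟩ := ha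
    subst ha1; subst ha2; subst ha3; subst ha4
    exact ⟨[], rest, rfl⟩

-- streak reaches 4 iff the next (4 - c) tags are all 'C', or CCCC occurs later
theorem bestStreak_ge_four_iff (ts : List Char) (c : Nat) (hc : c ≤ 3) :
    4 ≤ bestStreak ts c ↔
      (((ts.take (4 - c)).all (· == 'C')) = true ∧ 4 - c ≤ ts.length)
        ∨ ['C', 'C', 'C', 'C'] <:+: ts := by
  induction ts generalizing c with
  | nil =>
      simp only [bestStreak, List.take_nil, List.all_nil, List.length_nil]
      constructor
      · omega
      · rintro (⟨-, h⟩ | h)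
        · omega
        · exact absurd (List.eq_nil_of_infix_nil h) (by simp)
  | cons t ts ih =>
      by_cases hC : (t == 'C') = true
      · have ht : t = 'C' := by simpa using hC
        subst ht
        rw [bestStreak_consC]
        by_cases h3 : c = 3
        · subst h3
          constructor
          · intro _
            exact Or.inl ⟨by simp, by simp⟩
          · intro _
            simp
        · have hc' : c + 1 ≤ 3 := by omega
          have hiff := ih (c + 1) hc'
          have htk : 4 - c = (4 - (c + 1)) + 1 := by omega
          constructor
          · intro h
            have h4 : 4 ≤ bestStreak ts (c + 1) := by omega
            rcases (hiff.mp h4) with ⟨ha, hl⟩ | hinf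
            · left
              refine ⟨?_, ?_⟩
              · rw [htk, List.take_succ_cons]
                simp only [List.all_cons, Bool.and_eq_true]
                exact ⟨by simp, ha⟩
              · rw [htk]
                simp
                omega
            · exact Or.inr (List.infix_cons hinf)
          · rintro (⟨ha, hl⟩ | hinf)
            · rw [htk, List.take_succ_cons] at ha
              simp only [List.all_cons, Bool.and_eq_true] at ha
              have h4 : 4 ≤ bestStreak ts (c + 1) :=
                hiff.mpr (Or.inl ⟨ha.2, by rw [htk] at hl; simp at hl; omega⟩)
              omega
            · rcases (List.infix_cons_iff.mp hinf) with hpre | hinf'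
              · -- CCCC is a prefix of 'C'::ts: the first 4-(c+1) ≤ 3 tags of ts are C
                obtain ⟨suf, hsuf⟩ := hpre
                have hts : ts = 'C' :: 'C' :: 'C' :: suf := by
                  have := hsuf.symm
                  simp only [List.cons_append, List.nil_append] at this
                  exact (List.cons.injEq _ _ _ _ ▸ this : _ ∧ _).2
                have h4 : 4 ≤ bestStreak ts (c + 1) := by
                  apply hiff.mpr
                  left
                  subst hts
                  have h43 : 4 - (c + 1) ≤ 3 := by omega
                  constructor
                  · have hall : ∀ k ≤ 3,
                        ((('C' :: 'C' :: 'C' :: suf : List Char).take k).all (· == 'C')) = true := by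
                      intro k hk
                      interval_cases k <;> simp
                    exact hall _ h43
                  · simp
                    omega
                omega
              · have h4 : 4 ≤ bestStreak ts (c + 1) := hiff.mpr (Or.inr hinf')
                omega
      · -- reset tag: the streak restarts at 0; a CCCC prefix is impossible (head ≠ 'C')
        rw [bestStreak_cons_ne t ts c (by simpa using hC)]
        have hiff := ih 0 (by omega)
        have h4c : 0 < 4 - c := by omega
        constructor
        · intro h
          rcases (hiff.mp h) with ⟨ha, hl⟩ | hinf
          · right
            have hl' : 4 ≤ ts.length := by simpa using hl
            have ha' : ((ts.take 4).all (· == 'C')) = true := by simpa using ha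
            exact List.infix_cons (take_all_C_infix ts ha' hl')
          · exact Or.inr (List.infix_cons hinf)
        · rintro (⟨ha, hl⟩ | hinf)
          · exfalso
            have hmem : t ∈ (t :: ts).take (4 - c) := by
              cases h : (4 - c) with
              | zero => omega
              | succ k => simp [List.take_succ_cons]
            have := (List.all_eq_true.mp ha) t hmem
            simp_all
          · rcases (List.infix_cons_iff.mp hinf) with hpre | hinf'
            · exfalso
              obtain ⟨suf, hsuf⟩ := hpre
              simp only [List.cons_append] at hsuf
              have h0 : 'C' = t := (List.cons.injEq _ _ _ _ ▸ hsuf : _ ∧ _).1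
              exact (by simpa using hC : ¬ t = 'C') h0.symm
            · apply hiff.mpr
              right
              exact hinf'

-- ===== VERDICT =====
theorem has_arrow_anti_pattern_py_spec : Claim_equal_has_arrow_anti_pattern_py := by
  intro content _
  unfold Spec_has_arrow_anti_pattern_py has_arrow_anti_pattern_py has_arrow_anti_pattern_py_alt
    arrowSignature
  rw [foldl_stepA_eq_tags, signature_eq_filterMap, List.nil_append]
  set ts := (PySem.Chars.splitOn content.toList ['\n']).filterMap arrowTag with hts
  have hmain := bestStreak_ge_four_iff ts 0 (by omega)
  have hfold := fold_tagStep_fst ts 0 0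
  by_cases h : ['C', 'C', 'C', 'C'] <:+: ts
  · have hT : (PySem.Chars.isIn "CCCC".toList ts) = true := by
      rw [PySem.Chars.isIn_iff_infix]
      simpa using h
    rw [hT, decide_eq_true_eq, hfold]
    have : 4 ≤ bestStreak ts 0 := hmain.mpr (Or.inr h)
    omega
  · have hF : (PySem.Chars.isIn "CCCC".toList ts) = false := by
      rw [PySem.Chars.isIn_eq_false_iff]
      simpa using h
    rw [hF, decide_eq_false_iff_not, hfold]
    intro hcontra
    have h4 : 4 ≤ bestStreak ts 0 := by omega
    rcases hmain.mp h4 with ⟨ha, hl⟩ | hinf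
    · exact h (take_all_C_infix ts (by simpa using ha) (by simpa using hl))
    · exact h hinf
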